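-- pv_equiv track=rewrite | github.com/dwillist/ProjectEuler | 26-50/Euler32.py | pentagonal
-- ===== SOURCE A (Python) =====
-- def pentagonal(x,y):
--     string = str(x) + str(y) + str(x*y)
--     if len(string) == 9:
--         for i in range(1,10):
--             if not str(i) in string:
--                 return False
--         return True
--     return False
-- ===== SOURCE B (Python) =====
-- def pentagonal(x, y):
--     return sorted(str(x) + str(y) + str(x * y)) == list('123456789')
-- ===== Notes on version B (the rewrite author's own statement) =====
-- stated objective: simpler
-- what changed: Replaces the length guard plus a nine-iteration substring-membership loop with one sort of the concatenated digits and a single equality comparison against '123456789'.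
import Mathlib
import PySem

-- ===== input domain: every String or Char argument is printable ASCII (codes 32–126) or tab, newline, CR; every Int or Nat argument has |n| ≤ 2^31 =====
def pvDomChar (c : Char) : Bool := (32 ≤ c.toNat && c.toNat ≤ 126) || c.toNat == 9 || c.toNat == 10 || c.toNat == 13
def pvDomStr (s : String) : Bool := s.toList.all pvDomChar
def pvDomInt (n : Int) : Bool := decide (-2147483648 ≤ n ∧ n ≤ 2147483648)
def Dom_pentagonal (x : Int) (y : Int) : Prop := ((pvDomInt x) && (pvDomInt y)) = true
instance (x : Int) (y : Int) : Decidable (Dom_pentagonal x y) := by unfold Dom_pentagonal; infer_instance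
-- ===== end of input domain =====

-- B replaces A's length guard + nine-iteration substring loop by sorting the concatenated
-- digit characters and comparing with '123456789' (objective: simpler).


-- ===== PORT A =====
-- the 'for i in range(1,10): if not str(i) in string: return False / return True' loop
def pentLoop (s : List Char) : List Int → Bool
  | [] => true
  | i :: rest =>
      if !(PySem.Chars.isIn (PySem.Int.toStr i).toList s) then false
      else pentLoop s rest

def pentagonal (x : Int) (y : Int) : Bool :=
  let string := (PySem.Int.toStr x).toList ++ (PySem.Int.toStr y).toList
                  ++ (PySem.Int.toStr (x * y)).toList
  if string.length == 9 then pentLoop string (PySem.List.pyRange 1 10 1)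
  else false

-- ===== PORT B =====
def pentagonal_alt (x : Int) (y : Int) : Bool :=
  let string := (PySem.Int.toStr x).toList ++ (PySem.Int.toStr y).toList
                  ++ (PySem.Int.toStr (x * y)).toList
  PySem.List.sorted string (fun c => c) false == ['1','2','3','4','5','6','7','8','9']

-- ===== PRECONDITION & SPEC =====
def Spec_pentagonal (x : Int) (y : Int) (out : Bool) : Prop := out = pentagonal_alt x y
instance (x : Int) (y : Int) (out : Bool) : Decidable (Spec_pentagonal x y out) := by unfold Spec_pentagonal; infer_instance

-- ===== CLAIM (what is proved, stated in full; the proofs are below) =====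
def Claim_equal_pentagonal : Prop := ∀ (x : Int) (y : Int), Dom_pentagonal x y → Spec_pentagonal x y (pentagonal x y)

-- ===== LEMMAS AND PROOFS =====

-- a single-character 'str(i) in string' test is membership
lemma isIn_singleton (c : Char) (l : List Char) :
    PySem.Chars.isIn [c] l = true ↔ c ∈ l := by
  rw [PySem.Chars.isIn_iff_infix]
  exact List.singleton_infix_iff c l

lemma perm_of_nodup_subset_length {l d : List Char}
    (hn : d.Nodup) (hs : d ⊆ l) (hl : l.length = d.length) : l.Perm d := by
  have h1 : List.Subperm d l := hn.subperm hs
  exact (h1.perm_of_length_le (le_of_eq hl)).symm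

-- A's guarded loop holds exactly when l is a permutation of the nine digit characters
lemma loopSide_iff (l : List Char) :
    ((if l.length == 9 then pentLoop l (PySem.List.pyRange 1 10 1) else false) = true)
      ↔ l.Perm ['1','2','3','4','5','6','7','8','9'] := by
  have hrange : PySem.List.pyRange 1 10 1 = [1,2,3,4,5,6,7,8,9] := by decide
  rw [hrange]
  constructor
  · intro h
    split_ifs at h with hlen
    · simp only [pentLoop] at h
      split_ifs at h with h1 h2 h3 h4 h5 h6 h7 h8 h9
      simp only [Bool.not_eq_true', Bool.not_eq_false] at h1 h2 h3 h4 h5 h6 h7 h8 h9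
      have hsub : (['1','2','3','4','5','6','7','8','9'] : List Char) ⊆ l := by
        intro c hc
        simp only [List.mem_cons, List.not_mem_nil, or_false] at hc
        rcases hc with h|h|h|h|h|h|h|h|h <;> subst h <;>
          first
          | exact (isIn_singleton _ l).mp h1
          | exact (isIn_singleton _ l).mp h2
          | exact (isIn_singleton _ l).mp h3
          | exact (isIn_singleton _ l).mp h4
          | exact (isIn_singleton _ l).mp h5
          | exact (isIn_singleton _ l).mp h6
          | exact (isIn_singleton _ l).mp h7
          | exact (isIn_singleton _ l).mp h8
          | exact (isIn_singleton _ l).mp h9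
      exact perm_of_nodup_subset_length (by decide) hsub (by simpa using hlen)
  · intro hp
    have hlen : l.length = 9 := by simpa using hp.length_eq
    have hmem : ∀ c ∈ (['1','2','3','4','5','6','7','8','9'] : List Char), c ∈ l :=
      fun c hc => hp.mem_iff.mpr hc
    have hin : ∀ c ∈ (['1','2','3','4','5','6','7','8','9'] : List Char),
        PySem.Chars.isIn [c] l = true :=
      fun c hc => (isIn_singleton c l).mpr (hmem c hc)
    simp only [hlen, beq_self_eq_true, if_true]
    simp only [pentLoop]
    have e1 : (PySem.Int.toStr 1).toList = ['1'] := by decide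
    have e2 : (PySem.Int.toStr 2).toList = ['2'] := by decide
    have e3 : (PySem.Int.toStr 3).toList = ['3'] := by decide
    have e4 : (PySem.Int.toStr 4).toList = ['4'] := by decide
    have e5 : (PySem.Int.toStr 5).toList = ['5'] := by decide
    have e6 : (PySem.Int.toStr 6).toList = ['6'] := by decide
    have e7 : (PySem.Int.toStr 7).toList = ['7'] := by decide
    have e8 : (PySem.Int.toStr 8).toList = ['8'] := by decide
    have e9 : (PySem.Int.toStr 9).toList = ['9'] := by decide
    rw [e1, e2, e3, e4, e5, e6, e7, e8, e9]
    rw [hin '1' (by decide), hin '2' (by decide), hin '3' (by decide), hin '4' (by decide),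
        hin '5' (by decide), hin '6' (by decide), hin '7' (by decide), hin '8' (by decide),
        hin '9' (by decide)]
    rfl

-- B's sort-and-compare holds under exactly the same condition
lemma sortSide_iff (l : List Char) :
    ((PySem.List.sorted l (fun c => c) false == ['1','2','3','4','5','6','7','8','9']) = true)
      ↔ l.Perm ['1','2','3','4','5','6','7','8','9'] := by
  rw [beq_iff_eq]
  constructor
  · intro h
    have := PySem.List.sorted_perm l (fun c : Char => c) false
    rw [h] at this
    exact this.symm
  · intro hp
    exact PySem.List.sorted_eq_of_perm_of_pairwise_lt l _ (fun c => c) hp.symm (by decide)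

lemma key_lemma (l : List Char) :
    (if l.length == 9 then pentLoop l (PySem.List.pyRange 1 10 1) else false)
      = (PySem.List.sorted l (fun c => c) false == ['1','2','3','4','5','6','7','8','9']) := by
  rw [Bool.eq_iff_iff, loopSide_iff, sortSide_iff]

-- ===== VERDICT (by name: the statement is the Claim_ definition above) =====
theorem pentagonal_spec : Claim_equal_pentagonal := by
  intro x y _
  unfold Spec_pentagonal pentagonal pentagonal_alt
  exact key_lemma _
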